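-- pv_equiv track=rewrite | github.com/MorphoCity/morpheo-plugin | morpheo/core/angles.py | num_partitions
-- ===== SOURCE A (Python) =====
-- def num_partitions( table ):
--     """ Return the number of equivalence classes.
--     """
--     n = 1
--     m = table[0]
--     for j in range(len(table)):
--         if m < table[j]:
--             m = table[j]
--             n = n+1
--     return n
-- ===== SOURCE B (Python) =====
-- def num_partitions(table):
--     """ Return the number of equivalence classes.
--     """
--     # phase 1: running (prefix) maxima
--     seq = []
--     m = None
--     for x in table:
--         m = x if m is None or x > m else m
--         seq.append(m)
--     # phase 2: 1 + number of strict increases between adjacent prefix maxima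
--     return 1 + sum(1 for a, b in zip(seq, seq[1:]) if b > a)
-- ===== Notes on version B (the rewrite author's own statement) =====
-- stated objective: alternative
-- what changed: A's single running-max pass that counts as it scans is replaced by a two-phase form: build the prefix-maxima sequence, then count adjacent strict increases with zip.
import Mathlib
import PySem

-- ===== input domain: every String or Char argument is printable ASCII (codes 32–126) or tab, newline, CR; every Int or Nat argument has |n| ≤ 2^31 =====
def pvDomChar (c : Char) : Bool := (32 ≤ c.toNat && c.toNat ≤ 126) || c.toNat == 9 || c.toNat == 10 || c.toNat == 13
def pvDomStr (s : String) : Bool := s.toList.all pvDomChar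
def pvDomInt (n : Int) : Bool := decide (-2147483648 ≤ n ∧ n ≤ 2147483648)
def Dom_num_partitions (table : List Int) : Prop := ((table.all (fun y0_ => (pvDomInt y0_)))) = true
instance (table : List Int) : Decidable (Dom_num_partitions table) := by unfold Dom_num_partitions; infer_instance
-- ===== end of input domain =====

-- B replaces A's counting-while-scanning running-max pass by a two-phase form
-- (build prefix-maxima, then count adjacent strict increases); alternative decomposition, same cost.


-- ===== PORT A =====
def num_partitions (table : List Int) : Int :=
  match PySem.List.pyGet? table 0 with
  | none => 0  -- unreachable: Pre_ requires table ≠ [], Python raises IndexError here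
  | some m0 =>
    ((PySem.List.pyRange 0 table.length 1).foldl
      (fun (st : Int × Int) j =>
        let t := PySem.List.pyGetD table j 0
        if st.2 < t then (st.1 + 1, t) else st) (1, m0)).1

-- ===== PORT B =====
-- phase 1 of Source B: the prefix-maxima sequence (m carried as Option, as in Source B)
def pvPrefixMax : List Int → Option Int → List Int
  | [], _ => []
  | x :: xs, none => x :: pvPrefixMax xs (some x)
  | x :: xs, some m =>
    (if m < x then x else m) :: pvPrefixMax xs (some (if m < x then x else m))

def num_partitions_alt (table : List Int) : Int :=
  let seq := pvPrefixMax table none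
  1 + (seq.zip seq.tail).foldl
        (fun (acc : Int) (p : Int × Int) => if p.1 < p.2 then acc + 1 else acc) 0

-- ===== PRECONDITION & SPEC =====
-- Pre_ excludes only the empty list, on which Python A raises IndexError indexing the first element.
def Pre_num_partitions (table : List Int) : Prop := table ≠ []
instance (table : List Int) : Decidable (Pre_num_partitions table) := by
  unfold Pre_num_partitions; infer_instance
def pvWitness_num_partitions : List Int := [3, 1, 4]

def Spec_num_partitions (table : List Int) (out : Int) : Prop := out = num_partitions_alt table
instance (table : List Int) (out : Int) : Decidable (Spec_num_partitions table out) := by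
  unfold Spec_num_partitions; infer_instance

-- ===== CLAIM (what is proved, stated in full; the proofs are below) =====
def Claim_equal_num_partitions : Prop := ∀ (table : List Int), Dom_num_partitions table → Pre_num_partitions table → Spec_num_partitions table (num_partitions table)

-- ===== LEMMAS AND PROOFS =====

-- the common recursive characterisation of "number of strict running-max increases"
def pvIncr : Int → List Int → Int
  | _, [] => 0
  | m, x :: xs => if m < x then 1 + pvIncr x xs else pvIncr m xs

-- A's loop body as a named function
def pvStepA (st : Int × Int) (t : Int) : Int × Int :=
  if st.2 < t then (st.1 + 1, t) else st

lemma foldA_fst (xs : List Int) : ∀ (n m : Int),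
    (xs.foldl pvStepA (n, m)).1 = n + pvIncr m xs := by
  induction xs with
  | nil => intro n m; simp [pvIncr]
  | cons x xs ih =>
    intro n m
    simp only [List.foldl_cons, pvStepA, pvIncr]
    by_cases h : m < x
    · simp only [if_pos h, ih]; ring
    · simp only [if_neg h, ih]

lemma zip_count (xs : List Int) : ∀ (m : Int) (c : Int),
    (((m :: pvPrefixMax xs (some m)).zip (pvPrefixMax xs (some m))).foldl
      (fun (acc : Int) (p : Int × Int) => if p.1 < p.2 then acc + 1 else acc) c)
    = c + pvIncr m xs := by
  induction xs with
  | nil => intro m c; simp [pvPrefixMax, pvIncr]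
  | cons x xs ih =>
    intro m c
    simp only [pvPrefixMax, List.zip_cons_cons, List.foldl_cons, pvIncr]
    by_cases h : m < x
    · simp only [if_pos h]
      rw [ih]; ring
    · simp only [if_neg h]
      have : ¬ m < m := lt_irrefl m
      rw [if_neg this, ih]

-- ===== VERDICT (by name: the statement is the Claim_ definition above) =====
theorem num_partitions_spec : Claim_equal_num_partitions := by
  intro table _ hpre
  unfold Spec_num_partitions num_partitions num_partitions_alt
  obtain ⟨x, xs, rfl⟩ := List.exists_cons_of_ne_nil hpre
  simp only [PySem.List.pyGet?, PySem.List.pyIdx?]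
  norm_num
  have hfold := PySem.List.foldl_pyRange_zero_pyGetD (x :: xs) 0
      pvStepA ((1 : Int), x)
  simp only [pvStepA] at hfold
  simp only [PySem.List.len_eq, List.length_cons, Nat.cast_add, Nat.cast_one] at hfold
  rw [hfold]
  simp only [List.foldl_cons, pvStepA, lt_irrefl]
  rw [foldA_fst]
  simp only [pvPrefixMax, List.tail_cons]
  rw [zip_count]
  simp
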